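-- pv_equiv track=rewrite | github.com/snanda8/evrp-dissertation | mainGA.py | is_fully_connected
-- ===== SOURCE A (Python) =====
-- def is_fully_connected(nodes, cost_matrix):
--     """
--     Ensures that all nodes are reachable from the depot.
--     Uses BFS/DFS to check connectivity.
--     """
--     visited = set()
--     queue = [0]
--
--     while queue:
--         current = queue.pop()
--         if current not in visited:
--             visited.add(current)
--             queue.extend([j for j in nodes if (current, j) in cost_matrix])
--
--     return visited == set(nodes.keys())
-- ===== SOURCE B (Python) =====
-- def is_fully_connected(nodes, cost_matrix):
--     """
--     Ensures that all nodes are reachable from the depot.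
--     Adjacency list precomputed from cost_matrix keys; DFS marks a node
--     visited when it is pushed, so nothing is ever pushed twice.
--     """
--     adj = {}
--     for (i, j) in cost_matrix:
--         if j in nodes:
--             adj[i] = adj.get(i, []) + [j]
--     visited = {0}
--     stack = [0]
--     while stack:
--         cur = stack.pop()
--         for j in adj.get(cur, []):
--             if j not in visited:
--                 visited.add(j)
--                 stack.append(j)
--     return visited == set(nodes)
-- ===== Notes on version B (the rewrite author's own statement) =====
-- stated objective: faster
-- what changed: B precomputes an adjacency list from the cost_matrix keys once and runs a DFS that marks nodes visited at push time, replacing A's per-visit scan of all nodes with re-pushes of already-visited nodes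
import Mathlib
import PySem

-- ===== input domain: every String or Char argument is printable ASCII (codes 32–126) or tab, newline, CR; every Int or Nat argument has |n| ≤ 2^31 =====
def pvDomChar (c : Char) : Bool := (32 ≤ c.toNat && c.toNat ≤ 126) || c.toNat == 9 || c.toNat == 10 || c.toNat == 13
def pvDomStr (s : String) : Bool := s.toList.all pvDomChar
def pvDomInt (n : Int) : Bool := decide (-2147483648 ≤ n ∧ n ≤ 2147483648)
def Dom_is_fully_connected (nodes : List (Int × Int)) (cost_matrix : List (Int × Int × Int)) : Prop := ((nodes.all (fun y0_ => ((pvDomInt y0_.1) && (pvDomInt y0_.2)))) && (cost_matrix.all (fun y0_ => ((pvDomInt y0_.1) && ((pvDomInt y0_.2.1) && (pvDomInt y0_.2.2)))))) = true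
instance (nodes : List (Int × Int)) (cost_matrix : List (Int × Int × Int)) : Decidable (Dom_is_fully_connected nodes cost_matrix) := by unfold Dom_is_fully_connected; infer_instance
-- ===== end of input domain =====

-- B precomputes an adjacency list from the cost_matrix keys and marks nodes visited at push
-- time (no re-pushes), instead of A's scan of all node keys at every visit: same return value.

-- ===== PORT A =====
-- number of elements of `dom` not yet in `visited` (termination measure helper for both loops)
def pvUnvis (dom : List Int) (visited : List Int) : Nat :=
  ((PySem.List.dedup dom).filter (fun x => !(PySem.Set.contains visited x))).length

theorem pvFilter_le {l : List Int} {p q : Int → Bool} (himp : ∀ x, q x = true → p x = true) :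
    (l.filter q).length ≤ (l.filter p).length :=
  List.Sublist.length_le (List.monotone_filter_right l himp)

theorem pvFilter_lt {l : List Int} {p q : Int → Bool} (himp : ∀ x, q x = true → p x = true)
    {c : Int} (hc : c ∈ l) (hp : p c = true) (hq : q c = false) :
    (l.filter q).length < (l.filter p).length := by
  induction l with
  | nil => cases hc
  | cons a t ih =>
    rcases List.mem_cons.mp hc with hc | hc
    · subst hc
      have hle : (t.filter q).length ≤ (t.filter p).length := pvFilter_le himp
      simp [hp, hq]
      omega
    · have ih' := ih hc
      by_cases hqa : q a = true
      · have hpa := himp a hqa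
        simp [hqa, hpa]
        omega
      · by_cases hpa : p a = true <;> simp [hqa, hpa] <;> omega

theorem pvUnvis_mono {dom v w : List Int} (h : ∀ x ∈ v, x ∈ w) :
    pvUnvis dom w ≤ pvUnvis dom v := by
  apply pvFilter_le
  intro x hx
  simp only [Bool.not_eq_eq_eq_not, Bool.not_true] at hx ⊢
  simp only [PySem.Set.contains_eq_listContains, List.contains_eq_mem, decide_eq_false_iff_not] at hx ⊢
  exact fun hm => hx (h x hm)

theorem pvUnvis_add_lt {dom visited : List Int} {c : Int}
    (hc : c ∈ dom) (hnv : c ∉ visited) :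
    pvUnvis dom (PySem.Set.add visited c) < pvUnvis dom visited := by
  apply pvFilter_lt (p := fun x => !(PySem.Set.contains visited x))
    (q := fun x => !(PySem.Set.contains (PySem.Set.add visited c) x)) (c := c)
  · intro x hx
    simp only [Bool.not_eq_eq_eq_not, Bool.not_true] at hx ⊢
    simp only [PySem.Set.contains_eq_listContains, List.contains_eq_mem, decide_eq_false_iff_not] at hx ⊢
    exact fun hm => hx ((PySem.Set.mem_add visited c x).mpr (Or.inl hm))
  · simpa [PySem.List.mem_dedup] using hc
  · simpa using hnv
  · have : c ∈ PySem.Set.add visited c := (PySem.Set.mem_add visited c c).mpr (Or.inr rfl)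
    simp [this]

-- A's while loop: pop from the end; if unvisited, visit and push every key j with (current, j)
-- an edge (already-visited j included).  The hypothesis argument (queue elements are the depot
-- or node keys) is only used for termination.
def aLoop (keys : List Int) (edges : List (Int × Int)) :
    (visited : PySem.Set Int) → (queue : List Int) →
    (∀ x ∈ queue, x ∈ (0 : Int) :: keys) → PySem.Set Int
  | visited, [], _ => visited
  | visited, a :: rest, hq =>
    if hv : PySem.Set.contains visited ((a :: rest).getLast (List.cons_ne_nil a rest)) then
      aLoop keys edges visited ((a :: rest).dropLast)
        (fun x hx => hq x (List.dropLast_subset _ hx))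
    else
      aLoop keys edges
        (PySem.Set.add visited ((a :: rest).getLast (List.cons_ne_nil a rest)))
        ((a :: rest).dropLast ++
          keys.filter (fun j => edges.contains ((a :: rest).getLast (List.cons_ne_nil a rest), j)))
        (by
          intro x hx
          rcases List.mem_append.mp hx with h | h
          · exact hq x (List.dropLast_subset _ h)
          · exact List.mem_cons_of_mem _ (List.mem_of_mem_filter h))
  termination_by visited queue hq => (pvUnvis ((0 : Int) :: keys) visited, queue.length)
  decreasing_by
  · exact Prod.Lex.right _ (by simp only [List.length_dropLast, List.length_cons]; omega)
  · exact Prod.Lex.left _ _ (pvUnvis_add_lt (hq _ (List.getLast_mem _)) (by simpa using hv))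

def is_fully_connected (nodes : List (Int × Int)) (cost_matrix : List (Int × Int × Int)) : Bool :=
  -- iterating / membership on the Python dicts: keys in first-occurrence order
  PySem.Set.equal
    (aLoop (PySem.List.dedup (nodes.map (fun p => p.1)))
      (PySem.List.dedup (cost_matrix.map (fun t => (t.1, t.2.1))))
      PySem.Set.empty [0]
      (by intro x hx; rcases List.mem_singleton.mp hx with rfl; exact List.mem_cons_self))
    (PySem.Set.ofList (PySem.List.dedup (nodes.map (fun p => p.1))))

-- ===== PORT B =====
-- one step of the inner `for j in adj.get(cur, [])` loop: mark-and-push if unvisited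
def bStep (vs : PySem.Set Int × List Int) (j : Int) : PySem.Set Int × List Int :=
  if PySem.Set.contains vs.1 j then vs else (PySem.Set.add vs.1 j, vs.2 ++ [j])

theorem pvBFold_measure (dom : List Int) :
    ∀ (js : List Int) (v : PySem.Set Int) (s : List Int), (∀ j ∈ js, j ∈ dom) →
      pvUnvis dom (js.foldl bStep (v, s)).1 + (js.foldl bStep (v, s)).2.length
        ≤ pvUnvis dom v + s.length := by
  intro js
  induction js with
  | nil => intro v s _; simp
  | cons j t ih =>
    intro v s hdom
    simp only [List.foldl_cons]
    by_cases hv : j ∈ v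
    · have hst : bStep (v, s) j = (v, s) := by simp [bStep, hv]
      rw [hst]
      exact ih v s (fun x hx => hdom x (List.mem_cons_of_mem _ hx))
    · have hst : bStep (v, s) j = (PySem.Set.add v j, s ++ [j]) := by simp [bStep, hv]
      rw [hst]
      have h1 := ih (PySem.Set.add v j) (s ++ [j]) (fun x hx => hdom x (List.mem_cons_of_mem _ hx))
      have h2 := pvUnvis_add_lt (dom := dom) (hdom j List.mem_cons_self) hv
      simp only [List.length_append, List.length_cons, List.length_nil] at h1
      omega

theorem pvBFold_facts :
    ∀ (js : List Int) (v : PySem.Set Int) (s : List Int),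
      (∀ x ∈ v, x ∈ (js.foldl bStep (v, s)).1) ∧
      (∀ x ∈ s, x ∈ (js.foldl bStep (v, s)).2) ∧
      (∀ j ∈ js, j ∈ (js.foldl bStep (v, s)).1) ∧
      (∀ x ∈ (js.foldl bStep (v, s)).1, x ∈ v ∨ x ∈ js) ∧
      (∀ x ∈ (js.foldl bStep (v, s)).2, x ∈ s ∨ x ∈ (js.foldl bStep (v, s)).1) ∧
      (∀ x ∈ (js.foldl bStep (v, s)).1, x ∈ v ∨ x ∈ (js.foldl bStep (v, s)).2) := by
  intro js
  induction js with
  | nil =>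
    intro v s
    refine ⟨fun x hx => hx, fun x hx => hx, by simp, fun x hx => Or.inl hx,
      fun x hx => Or.inl hx, fun x hx => Or.inl hx⟩
  | cons j t ih =>
    intro v s
    by_cases hv : j ∈ v
    · have hst : bStep (v, s) j = (v, s) := by simp [bStep, hv]
      simp only [List.foldl_cons, hst]
      obtain ⟨a, b, c, d, e, f⟩ := ih v s
      refine ⟨a, b, ?_, ?_, e, f⟩
      · intro x hx
        rcases List.mem_cons.mp hx with h | h
        · exact h ▸ a _ hv
        · exact c _ h
      · intro x hx
        rcases d x hx with h | h
        · exact Or.inl h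
        · exact Or.inr (List.mem_cons_of_mem _ h)
    · have hst : bStep (v, s) j = (PySem.Set.add v j, s ++ [j]) := by simp [bStep, hv]
      simp only [List.foldl_cons, hst]
      obtain ⟨a, b, c, d, e, f⟩ := ih (PySem.Set.add v j) (s ++ [j])
      have hma : ∀ x, x ∈ PySem.Set.add v j ↔ x ∈ v ∨ x = j := fun x => PySem.Set.mem_add v j x
      refine ⟨?_, ?_, ?_, ?_, ?_, ?_⟩
      · intro x hx; exact a _ ((hma x).mpr (Or.inl hx))
      · intro x hx; exact b _ (List.mem_append_left _ hx)
      · intro x hx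
        rcases List.mem_cons.mp hx with h | h
        · exact h ▸ a _ ((hma j).mpr (Or.inr rfl))
        · exact c _ h
      · intro x hx
        rcases d x hx with h | h
        · rcases (hma x).mp h with h' | h'
          · exact Or.inl h'
          · exact Or.inr (h' ▸ List.mem_cons_self)
        · exact Or.inr (List.mem_cons_of_mem _ h)
      · intro x hx
        rcases e x hx with h | h
        · rcases List.mem_append.mp h with h' | h'
          · exact Or.inl h'
          · rcases List.mem_singleton.mp h' with rfl
            exact Or.inr (a _ ((hma x).mpr (Or.inr rfl)))
        · exact Or.inr h
      · intro x hx
        rcases f x hx with h | h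
        · rcases (hma x).mp h with h' | h'
          · exact Or.inl h'
          · subst h'
            exact Or.inr (b _ (List.mem_append_right _ (List.mem_singleton_self x)))
        · exact Or.inr h

-- B's while loop: pop from the end, fold the adjacency row of the popped node with bStep.
-- The hypothesis argument (adjacency values lie in `dom`) is only used for termination.
def bLoop (adj : PySem.Dict Int (List Int)) (dom : List Int)
    (hadj : ∀ c : Int, ∀ j ∈ adj.getD c [], j ∈ dom) :
    (visited : PySem.Set Int) → (stack : List Int) → PySem.Set Int
  | visited, [] => visited
  | visited, a :: rest =>
    bLoop adj dom hadj
      (((adj.getD ((a :: rest).getLast (List.cons_ne_nil a rest)) []).foldl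
        bStep (visited, (a :: rest).dropLast)).1)
      (((adj.getD ((a :: rest).getLast (List.cons_ne_nil a rest)) []).foldl
        bStep (visited, (a :: rest).dropLast)).2)
  termination_by visited stack => (pvUnvis dom visited, stack.length)
  decreasing_by
  · have hm := pvBFold_measure dom (adj.getD ((a :: rest).getLast (List.cons_ne_nil a rest)) [])
      visited ((a :: rest).dropLast) (hadj _)
    have hmono := pvUnvis_mono (dom := dom)
      (pvBFold_facts (adj.getD ((a :: rest).getLast (List.cons_ne_nil a rest)) [])
        visited ((a :: rest).dropLast)).1
    simp only [List.length_dropLast, List.length_cons] at hm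
    by_cases hlt : pvUnvis dom ((adj.getD ((a :: rest).getLast (List.cons_ne_nil a rest)) []).foldl
        bStep (visited, (a :: rest).dropLast)).1 < pvUnvis dom visited
    · exact Prod.Lex.left _ _ hlt
    · have heq := le_antisymm hmono (Nat.le_of_not_lt hlt)
      rw [heq]
      exact Prod.Lex.right _ (by simp only [List.length_cons]; omega)

def is_fully_connected_alt (nodes : List (Int × Int)) (cost_matrix : List (Int × Int × Int)) : Bool :=
  -- `for (i, j) in cost_matrix: if j in nodes: adj[i] = adj.get(i, []) + [j]`
  PySem.Set.equal
    (bLoop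
      (((PySem.List.dedup (cost_matrix.map (fun t => (t.1, t.2.1)))).filter
          (fun p => (nodes.map (fun p => p.1)).contains p.2)).foldl
        (fun d p => d.modify p.1 [] (· ++ [p.2])) PySem.Dict.empty)
      (((PySem.List.dedup (cost_matrix.map (fun t => (t.1, t.2.1)))).filter
          (fun p => (nodes.map (fun p => p.1)).contains p.2)).map (fun p => p.2))
      (by
        intro c j hj
        rw [PySem.Dict.getD_foldl_modify_append] at hj
        have h0 : (PySem.Dict.empty : PySem.Dict Int (List Int)).getD c [] = [] := rfl
        rw [h0, List.nil_append] at hj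
        rcases List.mem_map.mp hj with ⟨p, hp, hpj⟩
        exact List.mem_map.mpr ⟨p, List.mem_of_mem_filter hp, hpj⟩)
      (PySem.Set.ofList [0]) [0])
    (PySem.Set.ofList (nodes.map (fun p => p.1)))

-- ===== PRECONDITION & SPEC =====
def Spec_is_fully_connected (nodes : List (Int × Int)) (cost_matrix : List (Int × Int × Int)) (out : Bool) : Prop := out = is_fully_connected_alt nodes cost_matrix
instance (nodes : List (Int × Int)) (cost_matrix : List (Int × Int × Int)) (out : Bool) : Decidable (Spec_is_fully_connected nodes cost_matrix out) := by unfold Spec_is_fully_connected; infer_instance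

-- ===== CLAIM (what is proved, stated in full; the proofs are below) =====
def Claim_equal_is_fully_connected : Prop := ∀ (nodes : List (Int × Int)) (cost_matrix : List (Int × Int × Int)), Dom_is_fully_connected nodes cost_matrix → Spec_is_fully_connected nodes cost_matrix (is_fully_connected nodes cost_matrix)

-- ===== LEMMAS AND PROOFS =====

-- the edge relation both programs explore: j is a node key and (c, j) is a cost_matrix key
def pvE (keys : List Int) (edges : List (Int × Int)) (c j : Int) : Prop :=
  j ∈ keys ∧ (c, j) ∈ edges

-- a set containing 0 and closed under pvE contains everything reachable from 0
theorem pvClosed_reach {keys : List Int} {edges : List (Int × Int)} {visited : List Int}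
    (h0 : (0 : Int) ∈ visited)
    (hcl : ∀ v ∈ visited, ∀ j, pvE keys edges v j → j ∈ visited) :
    ∀ x, Relation.ReflTransGen (pvE keys edges) 0 x → x ∈ visited := by
  intro x hx
  induction hx with
  | refl => exact h0
  | tail _ hstep ih => exact hcl _ ih _ hstep

-- A's loop computes exactly the nodes reachable from 0
theorem aLoop_mem (keys : List Int) (edges : List (Int × Int)) :
    ∀ (visited : PySem.Set Int) (queue : List Int) (hq : ∀ x ∈ queue, x ∈ (0 : Int) :: keys),
      (∀ x ∈ visited, Relation.ReflTransGen (pvE keys edges) 0 x) →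
      (∀ x ∈ queue, Relation.ReflTransGen (pvE keys edges) 0 x) →
      (∀ v ∈ visited, ∀ j, pvE keys edges v j → j ∈ visited ∨ j ∈ queue) →
      ((0 : Int) ∈ visited ∨ (0 : Int) ∈ queue) →
      ∀ x, x ∈ aLoop keys edges visited queue hq ↔ Relation.ReflTransGen (pvE keys edges) 0 x
  | visited, [], hq, hI1, _, hI3, hI4 => by
    intro x
    rw [aLoop]
    exact ⟨hI1 x, pvClosed_reach (hI4.resolve_right (by simp))
      (fun v hv j hj => (hI3 v hv j hj).resolve_right (by simp)) x⟩
  | visited, a :: rest, hq, hI1, hI2, hI3, hI4 => by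
    intro x
    rw [aLoop]
    have hne : (a :: rest) ≠ [] := List.cons_ne_nil a rest
    set cur := (a :: rest).getLast hne with hcurdef
    set rest' := (a :: rest).dropLast with hrestdef
    have hsplit : rest' ++ [cur] = a :: rest := List.dropLast_append_getLast hne
    have hmemq : ∀ y, y ∈ (a :: rest) ↔ y ∈ rest' ∨ y = cur := by
      intro y
      rw [← hsplit, List.mem_append, List.mem_singleton]
    have hRc : Relation.ReflTransGen (pvE keys edges) 0 cur := hI2 _ (List.getLast_mem hne)
    by_cases hv : PySem.Set.contains visited cur
    · rw [dif_pos hv]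
      have hcv : cur ∈ visited := by simpa using hv
      refine aLoop_mem keys edges visited rest' _ hI1
        (fun y hy => hI2 y (List.dropLast_subset _ hy)) ?_ ?_ x
      · intro v hvv j hj
        rcases hI3 v hvv j hj with h | h
        · exact Or.inl h
        · rcases (hmemq j).mp h with h' | h'
          · exact Or.inr h'
          · exact Or.inl (h' ▸ hcv)
      · rcases hI4 with h | h
        · exact Or.inl h
        · rcases (hmemq 0).mp h with h' | h'
          · exact Or.inr h'
          · exact Or.inl (h' ▸ hcv)
    · rw [dif_neg hv]
      have hnv : cur ∉ visited := by simpa using hv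
      have hmadd : ∀ y, y ∈ PySem.Set.add visited cur ↔ y ∈ visited ∨ y = cur :=
        fun y => PySem.Set.mem_add visited cur y
      refine aLoop_mem keys edges _ _ _ ?_ ?_ ?_ ?_ x
      · intro y hy
        rcases (hmadd y).mp hy with h | h
        · exact hI1 y h
        · exact h ▸ hRc
      · intro y hy
        rcases List.mem_append.mp hy with h | h
        · exact hI2 y (List.dropLast_subset _ h)
        · have hk := List.mem_of_mem_filter h
          have he : (cur, y) ∈ edges := by simpa using List.of_mem_filter h
          exact hRc.tail ⟨hk, he⟩
      · intro v hvv j hj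
        rcases (hmadd v).mp hvv with h | h
        · rcases hI3 v h j hj with h' | h'
          · exact Or.inl ((hmadd j).mpr (Or.inl h'))
          · rcases (hmemq j).mp h' with h'' | h''
            · exact Or.inr (List.mem_append_left _ h'')
            · exact Or.inl ((hmadd j).mpr (Or.inr h''))
        · subst h
          refine Or.inr (List.mem_append_right _ ?_)
          exact List.mem_filter.mpr ⟨hj.1, by simpa using hj.2⟩
      · rcases hI4 with h | h
        · exact Or.inl ((hmadd 0).mpr (Or.inl h))
        · rcases (hmemq 0).mp h with h' | h'
          · exact Or.inr (List.mem_append_left _ h')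
          · exact Or.inl ((hmadd 0).mpr (Or.inr h'))
  termination_by visited queue hq => (pvUnvis ((0 : Int) :: keys) visited, queue.length)
  decreasing_by
  · exact Prod.Lex.right _ (by simp only [List.length_dropLast, List.length_cons]; omega)
  · exact Prod.Lex.left _ _ (pvUnvis_add_lt (hq _ (List.getLast_mem _)) (by simpa using hv))

-- B's loop computes exactly the nodes reachable from 0
theorem bLoop_mem (adj : PySem.Dict Int (List Int)) (dom : List Int)
    (hadj : ∀ c : Int, ∀ j ∈ adj.getD c [], j ∈ dom)
    (keys : List Int) (edges : List (Int × Int))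
    (hrow : ∀ c j, j ∈ adj.getD c [] ↔ pvE keys edges c j) :
    ∀ (visited : PySem.Set Int) (stack : List Int),
      (∀ x ∈ visited, Relation.ReflTransGen (pvE keys edges) 0 x) →
      (∀ x ∈ stack, x ∈ visited) →
      (∀ v ∈ visited, v ∈ stack ∨ ∀ j, pvE keys edges v j → j ∈ visited) →
      ((0 : Int) ∈ visited) →
      ∀ x, x ∈ bLoop adj dom hadj visited stack ↔ Relation.ReflTransGen (pvE keys edges) 0 x
  | visited, [], hJ1, _, hJ3, hJ4 => by
    intro x
    rw [bLoop]
    exact ⟨hJ1 x, pvClosed_reach hJ4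
      (fun v hv j hj => ((hJ3 v hv).resolve_left (by simp)) j hj) x⟩
  | visited, a :: rest, hJ1, hJ2, hJ3, hJ4 => by
    intro x
    rw [bLoop]
    have hne : (a :: rest) ≠ [] := List.cons_ne_nil a rest
    set cur := (a :: rest).getLast hne with hcurdef
    set rest' := (a :: rest).dropLast with hrestdef
    set js := adj.getD cur [] with hjsdef
    obtain ⟨fa, fb, fc, fd, fe, ff⟩ := pvBFold_facts js visited rest'
    have hsplit : rest' ++ [cur] = a :: rest := List.dropLast_append_getLast hne
    have hmemq : ∀ y, y ∈ (a :: rest) ↔ y ∈ rest' ∨ y = cur := by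
      intro y
      rw [← hsplit, List.mem_append, List.mem_singleton]
    have hRc : Relation.ReflTransGen (pvE keys edges) 0 cur :=
      hJ1 _ (hJ2 _ (List.getLast_mem hne))
    refine bLoop_mem adj dom hadj keys edges hrow _ _ ?_ ?_ ?_ ?_ x
    · intro y hy
      rcases fd y hy with h | h
      · exact hJ1 y h
      · exact hRc.tail ((hrow cur y).mp h)
    · intro y hy
      rcases fe y hy with h | h
      · exact fa y (hJ2 y ((hmemq y).mpr (Or.inl h)))
      · exact h
    · intro v hvv
      rcases ff v hvv with h | h
      · rcases hJ3 v h with h' | h'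
        · rcases (hmemq v).mp h' with h'' | h''
          · exact Or.inl (fb v h'')
          · subst h''
            exact Or.inr (fun j hj => fc j ((hrow cur j).mpr hj))
        · exact Or.inr (fun j hj => fa j (h' j hj))
      · exact Or.inl h
    · exact fa 0 hJ4
  termination_by visited stack => (pvUnvis dom visited, stack.length)
  decreasing_by
  · have hm := pvBFold_measure dom (adj.getD ((a :: rest).getLast (List.cons_ne_nil a rest)) [])
      visited ((a :: rest).dropLast) (hadj _)
    have hmono := pvUnvis_mono (dom := dom)
      (pvBFold_facts (adj.getD ((a :: rest).getLast (List.cons_ne_nil a rest)) [])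
        visited ((a :: rest).dropLast)).1
    simp only [List.length_dropLast, List.length_cons] at hm
    by_cases hlt : pvUnvis dom ((adj.getD ((a :: rest).getLast (List.cons_ne_nil a rest)) []).foldl
        bStep (visited, (a :: rest).dropLast)).1 < pvUnvis dom visited
    · exact Prod.Lex.left _ _ hlt
    · have heq := le_antisymm hmono (Nat.le_of_not_lt hlt)
      rw [heq]
      exact Prod.Lex.right _ (by simp only [List.length_cons]; omega)

-- membership in the row actually stored for c by B's adjacency-building fold
theorem pvAdj_row (nodeKeys : List Int) (pairs : List (Int × Int)) (c j : Int) :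
    (j ∈ ((pairs.filter (fun p => nodeKeys.contains p.2)).foldl
        (fun d p => d.modify p.1 [] (· ++ [p.2])) PySem.Dict.empty).getD c [])
      ↔ ((c, j) ∈ pairs ∧ j ∈ nodeKeys) := by
  rw [PySem.Dict.getD_foldl_modify_append]
  have h0 : (PySem.Dict.empty : PySem.Dict Int (List Int)).getD c [] = [] := rfl
  rw [h0, List.nil_append]
  constructor
  · intro hj
    rcases List.mem_map.mp hj with ⟨p, hp, hpj⟩
    rcases List.mem_filter.mp hp with ⟨hp2, hpc⟩
    rcases List.mem_filter.mp hp2 with ⟨hpd, hpk⟩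
    obtain ⟨p1, p2⟩ := p
    have hc : p1 = c := by simpa using hpc
    subst hc
    cases hpj
    exact ⟨hpd, by simpa using hpk⟩
  · rintro ⟨hd, hk⟩
    exact List.mem_map.mpr ⟨(c, j),
      List.mem_filter.mpr ⟨List.mem_filter.mpr ⟨hd, by simpa using hk⟩, by simp⟩, rfl⟩

-- Bool-valued set equality only depends on memberships
theorem pvEqual_congr {s s' t t' : PySem.Set Int}
    (hs : ∀ x, x ∈ s ↔ x ∈ s') (ht : ∀ x, x ∈ t ↔ x ∈ t') :
    PySem.Set.equal s t = PySem.Set.equal s' t' := by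
  rw [Bool.eq_iff_iff]
  simp only [PySem.Set.equal_iff]
  constructor
  · intro h x; rw [← hs, ← ht]; exact h x
  · intro h x; rw [hs, ht]; exact h x

-- ===== VERDICT (by name: the statement is the Claim_ definition above) =====
theorem is_fully_connected_spec : Claim_equal_is_fully_connected := by
  intro nodes cost_matrix _
  unfold Spec_is_fully_connected
  rw [is_fully_connected, is_fully_connected_alt]
  apply pvEqual_congr
  · intro x
    rw [aLoop_mem _ _ _ _ _
        (by intro y hy; simp [PySem.Set.empty] at hy)
        (by intro y hy; rcases List.mem_singleton.mp hy with rfl; exact Relation.ReflTransGen.refl)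
        (by intro v hv; simp [PySem.Set.empty] at hv)
        (Or.inr (List.mem_singleton_self 0))]
    rw [bLoop_mem _ _ _
        (PySem.List.dedup (nodes.map (fun p => p.1)))
        (PySem.List.dedup (cost_matrix.map (fun t => (t.1, t.2.1))))
        (by
          intro c j
          rw [pvAdj_row]
          unfold pvE
          constructor
          · rintro ⟨h1, h2⟩; exact ⟨by simpa using h2, h1⟩
          · rintro ⟨h1, h2⟩; exact ⟨h2, by simpa using h1⟩)
        _ _
        (by intro y hy; simp [PySem.Set.mem_ofList] at hy; subst hy; exact Relation.ReflTransGen.refl)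
        (by intro y hy; rcases List.mem_singleton.mp hy with rfl; simp [PySem.Set.mem_ofList])
        (by intro v hv; simp [PySem.Set.mem_ofList] at hv; subst hv; exact Or.inl (List.mem_singleton_self 0))
        (by simp [PySem.Set.mem_ofList])]
  · intro x
    simp [PySem.Set.mem_ofList]
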